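-- pv_equiv track=rewrite | github.com/rdo-infra/ci-config | jcomparison/perfcomp/pip_diff.py | get_pip_modules_names
-- ===== SOURCE A (Python) =====
-- def get_pip_modules_names(file_content):
--     flag = False
--     result = []
--     for line in file_content:
--         if flag:
--             result.append(line)
--         if '---------------------------------' in line:
--             flag = True
--     return result
-- ===== SOURCE B (Python) =====
-- def get_pip_modules_names(file_content):
--     # Skip until the dashed marker, then drain the rest of the iterator.
--     it = iter(file_content)
--     for line in it:
--         if '---------------------------------' in line:
--             return list(it)
--     return []
-- ===== Notes on version B (the rewrite author's own statement) =====
-- stated objective: simpler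
-- what changed: Replaces the flag-plus-per-line-append single pass with a two-phase iterator decomposition: skip lines until the marker, then return the remaining iterator drained to a list.
import Mathlib
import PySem

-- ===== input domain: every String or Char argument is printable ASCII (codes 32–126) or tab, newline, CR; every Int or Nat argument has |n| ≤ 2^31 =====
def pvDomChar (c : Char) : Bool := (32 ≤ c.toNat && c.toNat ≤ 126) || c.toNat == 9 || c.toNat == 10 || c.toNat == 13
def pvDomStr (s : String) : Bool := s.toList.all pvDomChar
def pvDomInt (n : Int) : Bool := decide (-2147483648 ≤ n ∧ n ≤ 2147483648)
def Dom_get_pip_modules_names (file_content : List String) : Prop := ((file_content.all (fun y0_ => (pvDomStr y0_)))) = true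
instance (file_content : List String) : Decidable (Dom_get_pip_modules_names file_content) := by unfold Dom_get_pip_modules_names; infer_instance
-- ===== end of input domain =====

-- B replaces A's flag-plus-append single pass by a two-phase skip-until-marker / take-the-rest decomposition (objective: simpler).

-- ===== PORT A =====
-- flag/result loop: append when flag is set, then set flag when the marker occurs in the line
def get_pip_modules_names (file_content : List String) : List String :=
  (file_content.foldl
    (fun (st : Bool × List String) line =>
      let result := if st.1 then st.2 ++ [line] else st.2
      let flag := if PySem.Str.isIn "---------------------------------" line then true else st.1
      (flag, result))
    (false, [])).2

-- ===== PORT B =====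
-- phase 1: advance until a line contains the marker; phase 2: the rest of the list is the answer
def pipAltGo : List String → List String
  | [] => []
  | line :: rest =>
      if PySem.Str.isIn "---------------------------------" line then rest
      else pipAltGo rest

def get_pip_modules_names_alt (file_content : List String) : List String :=
  pipAltGo file_content

-- ===== PRECONDITION & SPEC =====
def Spec_get_pip_modules_names (file_content : List String) (out : List String) : Prop := out = get_pip_modules_names_alt file_content
instance (file_content : List String) (out : List String) : Decidable (Spec_get_pip_modules_names file_content out) := by unfold Spec_get_pip_modules_names; infer_instance

-- ===== CLAIM (what is proved, stated in full; the proofs are below) =====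
def Claim_equal_get_pip_modules_names : Prop := ∀ (file_content : List String), Dom_get_pip_modules_names file_content → Spec_get_pip_modules_names file_content (get_pip_modules_names file_content)

-- ===== LEMMAS AND PROOFS =====

def pipStep (st : Bool × List String) (line : String) : Bool × List String :=
  let result := if st.1 then st.2 ++ [line] else st.2
  let flag := if PySem.Str.isIn "---------------------------------" line then true else st.1
  (flag, result)

-- once the flag is set, every remaining line is appended and the flag stays set
theorem pip_foldl_true (ls : List String) (acc : List String) :
    ls.foldl pipStep (true, acc) = (true, acc ++ ls) := by
  induction ls generalizing acc with
  | nil => simp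
  | cons l t ih =>
      simp only [List.foldl_cons, pipStep]
      simp only [if_true]
      rw [show (if PySem.Str.isIn "---------------------------------" l then true else true) = true by
        split <;> rfl]
      rw [ih]
      simp

-- before the flag is set, the accumulator is untouched and the result is acc ++ (rest after the marker)
theorem pip_foldl_false (ls : List String) (acc : List String) :
    (ls.foldl pipStep (false, acc)).2 = acc ++ pipAltGo ls := by
  induction ls generalizing acc with
  | nil => simp [pipAltGo]
  | cons l t ih =>
      simp only [List.foldl_cons, pipStep, pipAltGo]
      cases h : PySem.Str.isIn "---------------------------------" l
      · simp at h; simp [h, ih]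
      · simp at h; simp [h, pip_foldl_true]

-- ===== VERDICT (by name: the statement is the Claim_ definition above) =====
theorem get_pip_modules_names_spec : Claim_equal_get_pip_modules_names := by
  intro fc _
  show (fc.foldl _ (false, [])).2 = _
  have : ∀ ls : List String,
      (ls.foldl
        (fun (st : Bool × List String) line =>
          let result := if st.1 then st.2 ++ [line] else st.2
          let flag := if PySem.Str.isIn "---------------------------------" line then true else st.1
          (flag, result)) (false, [])) = ls.foldl pipStep (false, []) := by
    intro ls; rfl
  rw [this, pip_foldl_false]
  simp [get_pip_modules_names_alt]
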